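-- pv_equiv track=rewrite | github.com/Pavaka/Pygorithms | pygorithms/simplex_LP_covnert_to_trivial_starting_verticie_form.py | _rows_need_artificial_variable
-- ===== SOURCE A (Python) =====
-- def _rows_need_artificial_variable(function_coefficients, matrix_A):
--     rows_need_artificial_variable = [i for i in range(len(matrix_A))]
--
--     for j in range(len(function_coefficients)):
--
--         column_vector = [matrix_A[i][j] for i in range(len(matrix_A))]
--         found_single_positive_value = False
--
--         for index, value in enumerate(iter(column_vector)):
--             if value < 0:
--                 found_single_positive_value = False
--                 break
--             elif value > 0:
--                 if found_single_positive_value: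
--                     found_single_positive_value = False
--                     break
--                 found_single_positive_value = True
--                 row_of_positive_value = index
--             elif value == 0:
--                 continue
--         if found_single_positive_value and(
--                 row_of_positive_value in rows_need_artificial_variable):
--                     rows_need_artificial_variable.remove(row_of_positive_value)
--
--     return rows_need_artificial_variable
-- ===== SOURCE B (Python) =====
-- def _rows_need_artificial_variable(function_coefficients, matrix_A):
--     m = len(function_coefficients)
--     # per-column running stats: (saw_negative, positive_count, last_positive_row),
--     # updated in ONE row-major pass instead of A's per-column rescans
--     stats = [(False, 0, 0)] * m
--     for i, row in enumerate(matrix_A):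
--         stats = [
--             (neg or row[j] < 0, cnt + (row[j] > 0), i if row[j] > 0 else last)
--             for j, (neg, cnt, last) in enumerate(stats)
--         ]
--     covered = {last for (neg, cnt, last) in stats if not neg and cnt == 1}
--     return [i for i in range(len(matrix_A)) if i not in covered]
-- ===== Notes on version B (the rewrite author's own statement) =====
-- stated objective: alternative
-- what changed: Replaces A's per-column rescan with stateful break/flag logic and remove-as-you-go result list by a single row-major pass that maintains per-column aggregates (saw_negative, positive_count, last_positive_row), then derives the covered set and filters range(n).
import Mathlib
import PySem

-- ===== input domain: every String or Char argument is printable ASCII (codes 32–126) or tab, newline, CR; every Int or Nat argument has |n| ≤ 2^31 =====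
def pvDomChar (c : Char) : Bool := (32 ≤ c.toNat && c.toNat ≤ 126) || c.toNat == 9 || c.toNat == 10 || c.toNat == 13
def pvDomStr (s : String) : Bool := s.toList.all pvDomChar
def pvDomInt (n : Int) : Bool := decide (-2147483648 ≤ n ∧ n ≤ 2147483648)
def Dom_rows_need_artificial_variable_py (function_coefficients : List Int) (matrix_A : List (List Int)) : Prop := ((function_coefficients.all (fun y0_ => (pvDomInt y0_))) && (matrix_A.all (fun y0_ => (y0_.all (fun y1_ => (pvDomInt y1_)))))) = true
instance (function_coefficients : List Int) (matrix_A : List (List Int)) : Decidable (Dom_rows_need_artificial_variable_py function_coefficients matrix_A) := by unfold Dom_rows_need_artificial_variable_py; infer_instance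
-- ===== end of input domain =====

-- B replaces A's per-column rescans (break/flag scan + remove-as-you-go list) by ONE row-major
-- pass maintaining per-column aggregates, then a covered set and a range filter (objective: alternative).

-- ===== PORT A =====
-- A's inner 'for index, value in enumerate(...)' loop with its two 'break's:
-- state = (found_single_positive_value, row_of_positive_value); idx is the running enumerate index.
def pvAScan : List Int → Int → Bool → Int → Bool × Int
  | [], _, found, row => (found, row)
  | v :: rest, idx, found, row =>
    if v < 0 then (false, row)
    else if v > 0 then
      if found then (false, row)
      else pvAScan rest (idx + 1) true idx
    else pvAScan rest (idx + 1) found row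

def rows_need_artificial_variable_py (function_coefficients : List Int) (matrix_A : List (List Int)) : List Int :=
  (PySem.List.pyRange 0 (function_coefficients.length : Int) 1).foldl
    (fun acc j =>
      -- column_vector = [matrix_A[i][j] for i in range(len(matrix_A))]  (pyGetD: exact under Pre_)
      let column := (PySem.List.pyRange 0 (matrix_A.length : Int) 1).map
        (fun i => PySem.List.pyGetD (PySem.List.pyGetD matrix_A i []) j 0)
      let r := pvAScan column 0 false 0
      if r.1 && acc.contains r.2 then (PySem.List.remove? acc r.2).getD acc else acc)
    (PySem.List.pyRange 0 (matrix_A.length : Int) 1)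

-- ===== PORT B =====
-- the tuple built for column j when visiting row i with entry v = row[j]:
-- (neg or v < 0, cnt + (v > 0), i if v > 0 else last)
def pvRowUpd (i : Int) (v : Int) (st : Bool × Int × Int) : Bool × Int × Int :=
  (st.1 || decide (v < 0), st.2.1 + (if v > 0 then 1 else 0), if v > 0 then i else st.2.2)

def rows_need_artificial_variable_py_alt (function_coefficients : List Int) (matrix_A : List (List Int)) : List Int :=
  let stats : List (Bool × Int × Int) :=
    (PySem.List.enumerate matrix_A 0).foldl
      (fun stats p =>
        (PySem.List.enumerate stats 0).map
          (fun q => pvRowUpd p.1 (PySem.List.pyGetD p.2 q.1 0) q.2))  -- row[j]: exact under Pre_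
      (List.replicate function_coefficients.length (false, 0, 0))
  let covered : PySem.Set Int :=
    stats.foldl
      (fun cov st => if !st.1 && st.2.1 == 1 then PySem.Set.add cov st.2.2 else cov)
      PySem.Set.empty
  (PySem.List.pyRange 0 (matrix_A.length : Int) 1).filter (fun i => !(PySem.Set.contains covered i))

-- ===== PRECONDITION & SPEC =====
-- Pre_ excludes exactly the ragged inputs on which Python A raises IndexError:
-- some row shorter than len(function_coefficients) while columns 0..len(fc)-1 are read.
def Pre_rows_need_artificial_variable_py (function_coefficients : List Int) (matrix_A : List (List Int)) : Prop :=
  ∀ row ∈ matrix_A, function_coefficients.length ≤ row.length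

instance (function_coefficients : List Int) (matrix_A : List (List Int)) : Decidable (Pre_rows_need_artificial_variable_py function_coefficients matrix_A) := by unfold Pre_rows_need_artificial_variable_py; infer_instance

def pvWitness_rows_need_artificial_variable_py : List Int × List (List Int) := ([1, 0], [[1, 0], [0, 1]])

def Spec_rows_need_artificial_variable_py (function_coefficients : List Int) (matrix_A : List (List Int)) (out : List Int) : Prop := out = rows_need_artificial_variable_py_alt function_coefficients matrix_A
instance (function_coefficients : List Int) (matrix_A : List (List Int)) (out : List Int) : Decidable (Spec_rows_need_artificial_variable_py function_coefficients matrix_A out) := by unfold Spec_rows_need_artificial_variable_py; infer_instance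

-- ===== CLAIM (what is proved, stated in full; the proofs are below) =====
def Claim_equal_rows_need_artificial_variable_py : Prop := ∀ (function_coefficients : List Int) (matrix_A : List (List Int)), Dom_rows_need_artificial_variable_py function_coefficients matrix_A → Pre_rows_need_artificial_variable_py function_coefficients matrix_A → Spec_rows_need_artificial_variable_py function_coefficients matrix_A (rows_need_artificial_variable_py function_coefficients matrix_A)

-- ===== LEMMAS AND PROOFS =====

-- indices (starting at s) of the strictly positive entries of a column
def pvPosL : List Int → Int → List Int
  | [], _ => []
  | v :: rest, s => (if v > 0 then [s] else []) ++ pvPosL rest (s + 1)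

-- B's per-column aggregate, restated structurally over the column values with a running row index
def pvColStat : List Int → Int → (Bool × Int × Int) → Bool × Int × Int
  | [], _, st => st
  | v :: rest, s, st => pvColStat rest (s + 1) (pvRowUpd s v st)

theorem pvAScan_true (col : List Int) : ∀ (s r : Int),
    pvAScan col s true r = (col.all (fun v => decide (v = 0)), r) := by
  induction col with
  | nil => intro s r; simp [pvAScan]
  | cons v rest ih =>
    intro s r
    simp only [pvAScan, List.all_cons]
    by_cases h1 : v < 0
    · simp [h1]; omega
    · by_cases h2 : v > 0
      · simp [h1, h2]; omega
      · have hz : v = 0 := by omega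
        simp [hz, ih]

theorem pvAScan_allzero (col : List Int) : ∀ (s : Int),
    (col.all (fun v => decide (v = 0)))
      = (!(col.any (fun v => decide (v < 0))) && (pvPosL col s).length == 0) := by
  induction col with
  | nil => intro s; simp [pvPosL]
  | cons v rest ih =>
    intro s
    simp only [List.all_cons, List.any_cons, pvPosL]
    by_cases h2 : v > 0
    · simp [h2]; omega
    · by_cases h1 : v < 0
      · simp [h1]; omega
      · have hz : v = 0 := by omega
        simp [hz, ih (s + 1)]

theorem pvAScan_fst (col : List Int) : ∀ (s r : Int),
    (pvAScan col s false r).1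
      = (!(col.any (fun v => decide (v < 0))) && (pvPosL col s).length == 1) := by
  induction col with
  | nil => intro s r; simp [pvAScan, pvPosL]
  | cons v rest ih =>
    intro s r
    simp only [pvAScan, List.any_cons, pvPosL]
    by_cases h1 : v < 0
    · simp [h1]
    · by_cases h2 : v > 0
      · simp [h1, h2, pvAScan_true, pvAScan_allzero rest (s + 1)]
      · have hz : v = 0 := by omega
        simp [hz, ih (s + 1) r]

theorem pvAScan_snd (col : List Int) : ∀ (s r : Int),
    (pvAScan col s false r).1 = true → (pvAScan col s false r).2 = (pvPosL col s).headD 0 := by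
  induction col with
  | nil => intro s r h; simp [pvAScan] at h
  | cons v rest ih =>
    intro s r h
    by_cases h1 : v < 0
    · simp [pvAScan, h1] at h
    · by_cases h2 : v > 0
      · simp [pvAScan, pvPosL, h1, h2, pvAScan_true]
      · have hz : v = 0 := by omega
        simp only [pvAScan, if_neg h1, if_neg h2] at h
        simp only [pvAScan, pvPosL, if_neg h1, if_neg h2, List.nil_append]
        exact ih (s + 1) r h

-- B's aggregate characterised: negative seen, positive count, last positive row index
theorem pvColStat_eq (col : List Int) : ∀ (s : Int) (n : Bool) (c r : Int),
    pvColStat col s (n, c, r)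
      = (n || col.any (fun v => decide (v < 0)),
         c + ((pvPosL col s).length : Int),
         (pvPosL col s).getLastD r) := by
  induction col with
  | nil => intro s n c r; simp [pvColStat, pvPosL]
  | cons v rest ih =>
    intro s n c r
    simp only [pvColStat, pvRowUpd, pvPosL, List.any_cons]
    by_cases h2 : v > 0
    · have h1 : ¬ v < 0 := by omega
      simp only [if_pos h2, ih, Prod.mk.injEq]
      refine ⟨by simp [h1], ⟨by simp; ring, ?_⟩⟩
      rw [List.singleton_append, List.getLastD_cons]
    · by_cases h1 : v < 0
      · simp [h1, h2, ih]
      · simp [h1, h2, ih]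

theorem pvEnumerate_map {α β : Type} (g : α → β) (l : List α) : ∀ (s : Int),
    PySem.List.enumerate (l.map g) s
      = (PySem.List.enumerate l s).map (fun p => (p.1, g p.2)) := by
  induction l with
  | nil => intro s; simp [PySem.List.enumerate_nil]
  | cons x rest ih => intro s; simp [PySem.List.enumerate_cons, ih]

theorem pvEnumerate_pyRange : ∀ (n : Nat) (a : Int),
    PySem.List.enumerate (PySem.List.pyRange a (a + n) 1) a
      = (PySem.List.pyRange a (a + n) 1).map (fun j => (j, j)) := by
  intro n
  induction n with
  | zero =>
    intro a
    rw [PySem.List.pyRange_one_eq_nil (by omega)]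
    simp [PySem.List.enumerate_nil]
  | succ k ih =>
    intro a
    rw [PySem.List.pyRange_one_cons (by omega)]
    have this := ih (a + 1)
    push_cast at this ⊢
    rw [show a + 1 + (k : Int) = a + ((k : Int) + 1) by ring] at this
    simp [PySem.List.enumerate_cons, this]

-- B's row-major fold over the matrix computes, per column j, pvColStat of column j
theorem pvStatsFold (rows : List (List Int)) (M : Int) : ∀ (s : Int) (g : Int → Bool × Int × Int),
    (PySem.List.enumerate rows s).foldl
      (fun stats p =>
        (PySem.List.enumerate stats 0).map
          (fun q => pvRowUpd p.1 (PySem.List.pyGetD p.2 q.1 0) q.2))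
      ((PySem.List.pyRange 0 M 1).map g)
      = (PySem.List.pyRange 0 M 1).map
          (fun j => pvColStat (rows.map (fun r => PySem.List.pyGetD r j 0)) s (g j)) := by
  induction rows with
  | nil =>
    intro s g
    simp [PySem.List.enumerate_nil, pvColStat]
  | cons row rest ih =>
    intro s g
    rw [PySem.List.enumerate_cons, List.foldl_cons]
    have hstep : (PySem.List.enumerate ((PySem.List.pyRange 0 M 1).map g) 0).map
        (fun q => pvRowUpd s (PySem.List.pyGetD row q.1 0) q.2)
        = (PySem.List.pyRange 0 M 1).map
            (fun j => pvRowUpd s (PySem.List.pyGetD row j 0) (g j)) := by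
      rw [pvEnumerate_map]
      by_cases hM : 0 < M
      · have h0 : (0 : Int) + (M.toNat : Int) = M := by omega
        have := pvEnumerate_pyRange M.toNat 0
        rw [h0] at this
        rw [this, List.map_map, List.map_map]
        rfl
      · rw [PySem.List.pyRange_one_eq_nil (by omega)]
        simp [PySem.List.enumerate_nil]
    rw [hstep, ih (s + 1) (fun j => pvRowUpd s (PySem.List.pyGetD row j 0) (g j))]
    apply List.map_congr_left
    intro j _
    simp [pvColStat]

-- generic two-fold relation transfer
theorem pvFoldl_rel {α β γ : Type} (R : α → β → Prop) (fa : α → γ → α) (fb : β → γ → β)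
    (l : List γ) (a : α) (b : β) (h0 : R a b)
    (hstep : ∀ a b c, R a b → R (fa a c) (fb b c)) :
    R (l.foldl fa a) (l.foldl fb b) := by
  induction l generalizing a b with
  | nil => exact h0
  | cons c rest ih => exact ih _ _ (hstep a b c h0)

theorem pvFilter_add (range cov : List Int) (x : Int) (hnd : range.Nodup) :
    range.filter (fun i => !(PySem.Set.contains (PySem.Set.add cov x) i))
      = (if (range.filter (fun i => !(PySem.Set.contains cov i))).contains x
         then (PySem.List.remove? (range.filter (fun i => !(PySem.Set.contains cov i))) x).getD
                (range.filter (fun i => !(PySem.Set.contains cov i)))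
         else range.filter (fun i => !(PySem.Set.contains cov i))) := by
  have hc : ∀ i, PySem.Set.contains (PySem.Set.add cov x) i
      = (PySem.Set.contains cov i || i == x) := by
    intro i
    simp only [PySem.Set.contains, PySem.Set.add]
    by_cases h : List.contains cov x = true
    · rw [if_pos h]
      by_cases hix : i = x
      · subst hix
        simp only [beq_self_eq_true, Bool.or_true]
        exact h
      · simp [hix]
    · rw [if_neg h]
      by_cases hix : i = x
      · subst hix; simp
      · simp [hix]
  set acc := range.filter (fun i => !(PySem.Set.contains cov i)) with hacc
  have hnd' : acc.Nodup := hnd.filter _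
  have hsplit : range.filter (fun i => !(PySem.Set.contains (PySem.Set.add cov x) i))
      = acc.filter (fun i => !(i == x)) := by
    rw [hacc, List.filter_filter]
    apply List.filter_congr
    intro i _
    rw [hc i]
    cases PySem.Set.contains cov i <;> cases (i == x) <;> rfl
  rw [hsplit]
  by_cases hmem : acc.contains x = true
  · have hx : x ∈ acc := by simpa using hmem
    rw [if_pos hmem, PySem.List.remove?_eq_some_erase acc x hx]
    rw [Option.getD_some, List.Nodup.erase_eq_filter hnd']
    apply List.filter_congr
    intro i _
    simp [bne]
  · have hx : x ∉ acc := by simpa using hmem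
    rw [if_neg hmem]
    apply List.filter_eq_self.2
    intro i hi
    simp only [Bool.not_eq_eq_eq_not, Bool.not_true, beq_eq_false_iff_ne]
    intro h; exact hx (h ▸ hi)

-- ===== VERDICT (by name: the statement is the Claim_ definition above) =====
theorem rows_need_artificial_variable_py_spec : Claim_equal_rows_need_artificial_variable_py := by
  intro fc A _ _
  unfold Spec_rows_need_artificial_variable_py
  unfold rows_need_artificial_variable_py rows_need_artificial_variable_py_alt
  simp only []
  -- B's stats fold, characterised per column
  have hinit : (List.replicate fc.length ((false : Bool), (0 : Int), (0 : Int)))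
      = (PySem.List.pyRange 0 (fc.length : Int) 1).map (fun _ => (false, 0, 0)) := by
    have hmc : ∀ (l : List Int), l.map (fun _ => ((false : Bool), (0 : Int), (0 : Int)))
        = List.replicate l.length (false, 0, 0) := by
      intro l; induction l with
      | nil => rfl
      | cons x t iht => simp [List.replicate, iht]
    rw [hmc, PySem.List.length_pyRange_one]
    norm_num
  rw [hinit, pvStatsFold A (fc.length : Int) 0 (fun _ => (false, 0, 0)), List.foldl_map]
  -- relate the two outer folds via the invariant acc = range.filter (∉ cov)
  have main := pvFoldl_rel
    (fun (cov : PySem.Set Int) (acc : List Int) =>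
      acc = (PySem.List.pyRange 0 (A.length : Int) 1).filter
        (fun i => !(PySem.Set.contains cov i)))
    (fun cov j =>
      let st := pvColStat (A.map (fun r => PySem.List.pyGetD r j 0)) 0 (false, 0, 0)
      if !st.1 && st.2.1 == 1 then PySem.Set.add cov st.2.2 else cov)
    (fun acc j =>
      let column := (PySem.List.pyRange 0 (A.length : Int) 1).map
        (fun i => PySem.List.pyGetD (PySem.List.pyGetD A i []) j 0)
      let r := pvAScan column 0 false 0
      if r.1 && acc.contains r.2 then (PySem.List.remove? acc r.2).getD acc else acc)
    (PySem.List.pyRange 0 (fc.length : Int) 1)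
    PySem.Set.empty
    (PySem.List.pyRange 0 (A.length : Int) 1)
    ?init ?step
  · exact main
  · simp [PySem.Set.empty, PySem.Set.contains]
  · intro cov acc j hR
    simp only []
    -- identify the column
    have hcol : (PySem.List.pyRange 0 (A.length : Int) 1).map
        (fun i => PySem.List.pyGetD (PySem.List.pyGetD A i []) j 0)
        = A.map (fun r => PySem.List.pyGetD r j 0) := by
      have h1 : (PySem.List.pyRange 0 (A.length : Int) 1).map
          (fun i => PySem.List.pyGetD A i ([] : List Int)) = A :=
        PySem.List.map_pyGetD_pyRange_zero A []
      calc (PySem.List.pyRange 0 (A.length : Int) 1).map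
            (fun i => PySem.List.pyGetD (PySem.List.pyGetD A i []) j 0)
          = ((PySem.List.pyRange 0 (A.length : Int) 1).map
              (fun i => PySem.List.pyGetD A i ([] : List Int))).map
              (fun r => PySem.List.pyGetD r j 0) := by
              rw [List.map_map]; rfl
        _ = A.map (fun r => PySem.List.pyGetD r j 0) := by rw [h1]
    set col := A.map (fun r => PySem.List.pyGetD r j 0) with hcoldef
    rw [hcol, hR]
    have hst : pvColStat col 0 (false, 0, 0)
        = (col.any (fun v => decide (v < 0)),
           ((pvPosL col 0).length : Int),
           (pvPosL col 0).getLastD 0) := by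
      rw [pvColStat_eq]
      simp
    have hA1 := pvAScan_fst col 0 0
    by_cases hq : (!(col.any (fun v => decide (v < 0))) && (pvPosL col 0).length == 1) = true
    · -- qualified column: exactly one positive, no negative
      have hfound : (pvAScan col 0 false 0).1 = true := by rw [hA1]; exact hq
      have hrow := pvAScan_snd col 0 0 hfound
      obtain ⟨hneg, hlen⟩ := by
        have := hq; simp only [Bool.and_eq_true, Bool.not_eq_eq_eq_not, Bool.not_true,
          beq_iff_eq] at this; exact this
      obtain ⟨x, hx⟩ : ∃ x, pvPosL col 0 = [x] := by
        cases h : pvPosL col 0 with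
        | nil => rw [h] at hlen; simp at hlen
        | cons a t =>
          rw [h] at hlen; simp at hlen
          exact ⟨a, by rw [hlen]⟩
      have hhd : (pvAScan col 0 false 0).2 = x := by rw [hrow, hx]; rfl
      have hbcond : (!(pvColStat col 0 (false, 0, 0)).1
          && (pvColStat col 0 (false, 0, 0)).2.1 == 1) = true := by
        rw [hst]; simp [hneg, hx]
      have hbval : (pvColStat col 0 (false, 0, 0)).2.2 = x := by
        rw [hst]; simp [hx]
      have hfa := (pvFilter_add (PySem.List.pyRange 0 (A.length : Int) 1) cov x
        (PySem.List.nodup_pyRange_one 0 _)).symm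
      rw [hbcond, hbval]
      simp only [hfound, hhd, Bool.true_and]
      simpa using hfa
    · -- not qualified: both sides unchanged
      have hfound : (pvAScan col 0 false 0).1 = false := by
        rw [hA1]; exact Bool.not_eq_true _ ▸ (by simpa using hq)
      have hbcond : (!(pvColStat col 0 (false, 0, 0)).1
          && (pvColStat col 0 (false, 0, 0)).2.1 == 1) = false := by
        rw [hst]
        show (!(col.any (fun v => decide (v < 0)))
          && (((pvPosL col 0).length : Int) == 1)) = false
        cases hn : col.any (fun v => decide (v < 0)) with
        | true => simp
        | false =>
          have hlen : (pvPosL col 0).length ≠ 1 := by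
            intro hl
            exact hq (by simp [hn, hl])
          simp only [Bool.not_false, Bool.true_and, beq_eq_false_iff_ne, ne_eq]
          intro hc
          exact hlen (by exact_mod_cast hc)
      rw [hbcond, hfound]
      simp
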